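-- pv_equiv track=rewrite | github.com/eng-Marcio/mas_uav | src/singleUAV/src/Com_FMC.py | minimizeMap
-- ===== SOURCE A (Python) =====
-- def minimizeMap(inputMap):
--     i,j = 0, 0
--
--     len_y , len_x= len(inputMap)//2 , len(inputMap[0])//2
--     if(len(inputMap)%2 > 0 and len(inputMap[0])%2>0):
--         minimizedMap = [[0 for i in range(len_x+1)]for j in range(len_y+1)]
--     else:
--         if(len(inputMap)%2 > 0):
--             minimizedMap = [[0 for i in range(len_x)]for j in range(len_y+1)]
--         elif(len(inputMap[0])%2>0):
--             minimizedMap = [[0 for i in range(len_x+1)]for j in range(len_y)]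
--         else:
--             minimizedMap = [[0 for i in range(len_x)]for j in range(len_y)]
--     len_y , len_x= len(minimizedMap) , len(minimizedMap[0])
--
--     i,j = 0, 0
--     while (j<len_y):
--
--         while (i<(len_x)):
--
--             if((i*2+1==len(inputMap[0])) and (j*2+1==len(inputMap))):
--                 minimizedMap[j][i] = inputMap[j*2][i*2]
--             else:
--                 if((i*2+1==len(inputMap[0]))):
--                     minimizedMap[j][i] = max(inputMap[j*2][i*2],inputMap[(j*2)+1][i*2])
--                 elif((j*2+1==len(inputMap))):
--                     minimizedMap[j][i] = max(inputMap[j*2][i*2],inputMap[j*2][(i*2)+1])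
--                 else:
--                     minimizedMap[j][i] = max(inputMap[j*2][i*2],inputMap[j*2][(i*2)+1],inputMap[(j*2)+1][i*2],inputMap[(j*2)+1][(i*2)+1])
--             i+=1
--         i=0
--         j+=1
--     return minimizedMap
-- ===== SOURCE B (Python) =====
-- def minimizeMap(inputMap):
--     # Grid width is given by the first row (as in the original's sizing).
--     width = len(inputMap[0]) if inputMap else 0
--     # First pass: elementwise max of adjacent row pairs (lone last row kept as-is).
--     merged = []
--     k = 0
--     while k + 1 < len(inputMap):
--         merged.append([max(x, y) for x, y in zip(inputMap[k][:width], inputMap[k + 1][:width])])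
--         k += 2
--     if k < len(inputMap):
--         merged.append(inputMap[k][:width])
--     # Second pass: max of adjacent column pairs in each merged row (lone last kept).
--     out = []
--     for row in merged:
--         newRow = []
--         k = 0
--         while k + 1 < len(row):
--             newRow.append(max(row[k], row[k + 1]))
--             k += 2
--         if k < len(row):
--             newRow.append(row[k])
--         out.append(newRow)
--     return out
-- ===== Notes on version B (the rewrite author's own statement) =====
-- stated objective: simpler
-- what changed: Replaces A's zero-grid preallocation with parity case analysis plus an index-driven double while loop writing cells in place by a two-pass decomposition over the width of the first row: elementwise max of adjacent row pairs via zip, then max of adjacent column pairs, lone last row/column kept as-is.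
-- crash fix: On the empty outer list and on maps where some row is shorter than the first row, A raises IndexError; B returns a value there ([] on empty input, pairs truncated to the shorter row otherwise). — e.g. on minimizeMap([]): A raises IndexError, B returns []
import Mathlib
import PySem

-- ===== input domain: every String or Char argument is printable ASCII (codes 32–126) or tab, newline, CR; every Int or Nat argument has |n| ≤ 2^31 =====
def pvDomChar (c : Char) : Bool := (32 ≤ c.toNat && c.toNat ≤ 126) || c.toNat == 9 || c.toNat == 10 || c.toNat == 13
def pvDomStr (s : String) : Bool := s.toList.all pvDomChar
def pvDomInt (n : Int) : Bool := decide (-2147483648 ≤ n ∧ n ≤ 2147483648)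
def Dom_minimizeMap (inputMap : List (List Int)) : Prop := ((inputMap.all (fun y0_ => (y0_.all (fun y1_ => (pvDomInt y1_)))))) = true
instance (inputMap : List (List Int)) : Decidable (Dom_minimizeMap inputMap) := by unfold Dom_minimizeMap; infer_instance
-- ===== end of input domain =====

-- B replaces A's zero-grid preallocation + index-driven double while loop with a two-pass
-- decomposition (max adjacent row pairs, then max adjacent column pairs); simpler, same cost.


-- ===== PORT A =====
-- a[j][i] with both indices in range on every admitted input (Pre_ gives every row at
-- least the first row's length and the loop bounds keep 2j(+1) < n, 2i(+1) < m), so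
-- getD 0/[] is exact there.
def pvCellA (a : List (List Int)) (n m : Nat) (j i : Nat) : Int :=
  let g : Nat → Nat → Int := fun r c => ((a.getD r []).getD c 0)
  if 2*i+1 = m ∧ 2*j+1 = n then g (2*j) (2*i)
  else if 2*i+1 = m then max (g (2*j) (2*i)) (g (2*j+1) (2*i))
  else if 2*j+1 = n then max (g (2*j) (2*i)) (g (2*j) (2*i+1))
  else max (max (max (g (2*j) (2*i)) (g (2*j) (2*i+1))) (g (2*j+1) (2*i))) (g (2*j+1) (2*i+1))

def minimizeMap (inputMap : List (List Int)) : List (List Int) :=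
  let n := inputMap.length
  let m := (inputMap.headD []).length
  let len_y0 := n / 2
  let len_x0 := m / 2
  let minimizedMap :=
    if n % 2 > 0 ∧ m % 2 > 0 then List.replicate (len_y0+1) (List.replicate (len_x0+1) (0:Int))
    else if n % 2 > 0 then List.replicate (len_y0+1) (List.replicate len_x0 (0:Int))
    else if m % 2 > 0 then List.replicate len_y0 (List.replicate (len_x0+1) (0:Int))
    else List.replicate len_y0 (List.replicate len_x0 (0:Int))
  let len_y := minimizedMap.length
  let len_x := (minimizedMap.headD []).length
  -- the two while loops: assign minimizedMap[j][i] := pvCellA … for j < len_y, i < len_x in order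
  (List.range len_y).foldl (fun g j =>
    (List.range len_x).foldl (fun g i =>
      g.set j ((g.getD j []).set i (pvCellA inputMap n m j i))) g) minimizedMap

-- ===== PORT B =====
-- Python's r[:width] with width = len(inputMap[0]) ≥ 0 is exactly List.take width r.
def pvRowPairs (w : Nat) : List (List Int) → List (List Int)
  | a :: b :: rest => (List.zipWith max (a.take w) (b.take w)) :: pvRowPairs w rest
  | [a] => [a.take w]
  | [] => []

def pvColPairs : List Int → List Int
  | a :: b :: rest => max a b :: pvColPairs rest
  | [a] => [a]
  | [] => []

-- width = len(inputMap[0]) if inputMap else 0, i.e. (inputMap.headD []).length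
def minimizeMap_alt (inputMap : List (List Int)) : List (List Int) :=
  (pvRowPairs ((inputMap.headD []).length) inputMap).map pvColPairs

-- ===== PRECONDITION & SPEC =====
-- Pre_ excludes exactly the inputs on which A raises IndexError: the empty outer list,
-- and maps where some row is shorter than the first row (A indexes every row up to the
-- first row's length).
def Pre_minimizeMap (inputMap : List (List Int)) : Prop :=
  inputMap ≠ [] ∧ ∀ r ∈ inputMap, (inputMap.headD []).length ≤ r.length
instance (inputMap : List (List Int)) : Decidable (Pre_minimizeMap inputMap) := by
  unfold Pre_minimizeMap; infer_instance

def pvWitness_minimizeMap : List (List Int) := [[1, 2, 3], [4, 5, 6]]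

-- On the empty outer list and on maps with a row shorter than the first row A raises
-- IndexError; B returns a value there ([] on empty input, row pairs truncated by zip otherwise).
def Raises_minimizeMap (inputMap : List (List Int)) : Prop :=
  inputMap = [] ∨ ∃ r ∈ inputMap, r.length < (inputMap.headD []).length
instance (inputMap : List (List Int)) : Decidable (Raises_minimizeMap inputMap) := by
  unfold Raises_minimizeMap; infer_instance
def pvRaiseWitness_minimizeMap : List (List Int) := []
def pvRaiseWitnessOut_minimizeMap : List (List Int) := []

def Spec_minimizeMap (inputMap : List (List Int)) (out : List (List Int)) : Prop := out = minimizeMap_alt inputMap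
instance (inputMap : List (List Int)) (out : List (List Int)) : Decidable (Spec_minimizeMap inputMap out) := by unfold Spec_minimizeMap; infer_instance

-- ===== CLAIM (what is proved, stated in full; the proofs are below) =====
def Claim_equal_minimizeMap : Prop := ∀ (inputMap : List (List Int)), Dom_minimizeMap inputMap → Pre_minimizeMap inputMap → Spec_minimizeMap inputMap (minimizeMap inputMap)
def Claim_raises_minimizeMap : Prop := (∀ (inputMap : List (List Int)), Dom_minimizeMap inputMap → Raises_minimizeMap inputMap → ¬ Pre_minimizeMap inputMap) ∧ (Dom_minimizeMap (pvRaiseWitness_minimizeMap) ∧ Raises_minimizeMap (pvRaiseWitness_minimizeMap) ∧ minimizeMap_alt (pvRaiseWitness_minimizeMap) = pvRaiseWitnessOut_minimizeMap)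

-- ===== LEMMAS AND PROOFS =====

-- generic: fold of range c setting index j to a value computed from the current row j
theorem pvFoldSet {α : Type} (d : α) (h : α → Nat → α) :
    ∀ (c : Nat) (g : List α), c ≤ g.length →
    (List.range c).foldl (fun g j => g.set j (h (g.getD j d) j)) g
      = (List.range c).map (fun j => h (g.getD j d) j) ++ g.drop c := by
  intro c
  induction c with
  | zero => intro g _; simp
  | succ c ih =>
    intro g hg
    have hc : c < g.length := by omega
    rw [List.range_succ, List.foldl_append, ih g (by omega)]
    have hlenP : ((List.range c).map (fun j => h (g.getD j d) j)).length = c := by simp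
    have hdrop : g.drop c = g[c] :: g.drop (c+1) := List.drop_eq_getElem_cons hc
    have hget : ((List.range c).map (fun j => h (g.getD j d) j) ++ g.drop c).getD c d = g.getD c d := by
      rw [List.getD_eq_getElem _ _ (by simp; omega), List.getElem_append_right (by omega)]
      rw [List.getD_eq_getElem _ _ hc]
      simp only [hlenP, Nat.sub_self, List.getElem_drop, Nat.add_zero]
    simp only [List.foldl_cons, List.foldl_nil, hget]
    rw [List.set_append]
    simp only [hlenP, lt_irrefl, if_false, Nat.sub_self]
    rw [hdrop, List.set_cons_zero]
    simp [List.map_append]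
theorem pvHeadDReplicate {α : Type} (k : Nat) (x d : α) (hk : 0 < k) :
    (List.replicate k x).headD d = x := by
  cases k with
  | zero => omega
  | succ k => simp [List.replicate_succ]




theorem pvInnerFold (f : Nat → Int) (j : Nat) :
    ∀ (is : List Nat) (g : List (List Int)), j < g.length →
    is.foldl (fun g i => g.set j ((g.getD j []).set i (f i))) g
      = g.set j (is.foldl (fun r i => r.set i (f i)) (g.getD j [])) := by
  intro is
  induction is with
  | nil =>
    intro g hj
    simp only [List.foldl_nil]
    rw [List.getD_eq_getElem _ _ hj, List.set_getElem_self]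
  | cons i is ih =>
    intro g hj
    simp only [List.foldl_cons]
    rw [ih _ (by simpa using hj)]
    have : ((g.set j ((g.getD j []).set i (f i))).getD j []) = (g.getD j []).set i (f i) := by
      rw [List.getD_eq_getElem _ _ (by simpa using hj)]
      simp
    rw [this, List.set_set]

theorem pvFoldCongrLen (L : Nat) (f₁ f₂ : List (List Int) → Nat → List (List Int))
    (hlen : ∀ g j, g.length = L → (f₂ g j).length = L) :
    ∀ (is : List Nat) (g : List (List Int)), g.length = L →
      (∀ g' j, g'.length = L → j ∈ is → f₁ g' j = f₂ g' j) →
      is.foldl f₁ g = is.foldl f₂ g := by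
  intro is
  induction is with
  | nil => intro g _ _; rfl
  | cons a t ih =>
    intro g hg hf
    simp only [List.foldl_cons]
    rw [hf g a hg (by simp)]
    exact ih (f₂ g a) (hlen g a hg) (fun g' j h1 h2 => hf g' j h1 (by simp [h2]))

theorem pvColPairs_eq : ∀ (r : List Int),
    pvColPairs r = (List.range ((r.length + 1) / 2)).map (fun i =>
      if 2*i+1 = r.length then r.getD (2*i) 0
      else max (r.getD (2*i) 0) (r.getD (2*i+1) 0)) := by
  intro r
  induction r using pvColPairs.induct with
  | case1 a b rest ih =>
    have hlen : ((a :: b :: rest).length + 1) / 2 = (rest.length + 1) / 2 + 1 := by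
      simp; omega
    rw [pvColPairs, hlen, List.range_succ_eq_map, List.map_cons, List.map_map, ih]
    refine List.cons_eq_cons.mpr ⟨?_, ?_⟩
    · simp [List.getD]
    · apply List.map_congr_left
      intro i _
      have e1 : 2*(i+1) = (2*i+1)+1 := by ring
      simp only [Function.comp_apply, e1, List.getD_cons_succ]
      rcases eq_or_ne (2*i+1) rest.length with h | h
      · simp [h]
      · simp [h]
  | case2 a =>
    simp [pvColPairs, List.getD]
  | case3 =>
    simp [pvColPairs]

theorem pvRowPairs_eq (w : Nat) : ∀ (xs : List (List Int)),
    pvRowPairs w xs = (List.range ((xs.length + 1) / 2)).map (fun j =>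
      if 2*j+1 = xs.length then (xs.getD (2*j) []).take w
      else List.zipWith max ((xs.getD (2*j) []).take w) ((xs.getD (2*j+1) []).take w)) := by
  intro xs
  induction xs using pvRowPairs.induct with
  | case1 a b rest ih =>
    have hlen : ((a :: b :: rest).length + 1) / 2 = (rest.length + 1) / 2 + 1 := by
      simp; omega
    rw [pvRowPairs, hlen, List.range_succ_eq_map, List.map_cons, List.map_map, ih]
    refine List.cons_eq_cons.mpr ⟨?_, ?_⟩
    · simp [List.getD]
    · apply List.map_congr_left
      intro i _
      have e1 : 2*(i+1) = (2*i+1)+1 := by ring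
      simp only [Function.comp_apply, e1, List.getD_cons_succ]
      rcases eq_or_ne (2*i+1) rest.length with h | h
      · simp [h]
      · simp [h]
  | case2 a =>
    simp [pvRowPairs, List.getD]
  | case3 =>
    simp [pvRowPairs]

theorem pvAFill (a : List (List Int)) (n m R C : Nat) :
    (List.range R).foldl (fun g j => (List.range C).foldl
        (fun g i => g.set j ((g.getD j []).set i (pvCellA a n m j i))) g)
      (List.replicate R (List.replicate C (0:Int)))
    = (List.range R).map (fun j => (List.range C).map (fun i => pvCellA a n m j i)) := by
  have h1 : (List.range R).foldl (fun g j => (List.range C).foldl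
        (fun g i => g.set j ((g.getD j []).set i (pvCellA a n m j i))) g)
      (List.replicate R (List.replicate C (0:Int)))
      = (List.range R).foldl (fun g j => g.set j
          ((List.range C).foldl (fun r i => r.set i (pvCellA a n m j i)) (g.getD j [])))
        (List.replicate R (List.replicate C (0:Int))) := by
    apply pvFoldCongrLen R _ _ (fun g j hg => by simpa using hg) _ _ (by simp)
    intro g' j hg hj
    exact pvInnerFold _ j (List.range C) g' (by rw [hg]; exact List.mem_range.mp hj)
  refine h1.trans ?_
  refine (pvFoldSet ([] : List Int)
      (fun r j => (List.range C).foldl (fun r' i => r'.set i (pvCellA a n m j i)) r) R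
      (List.replicate R (List.replicate C (0:Int))) (by simp)).trans ?_
  rw [List.drop_replicate, Nat.sub_self, List.replicate_zero, List.append_nil]
  apply List.map_congr_left
  intro j hj
  have hjR : j < R := List.mem_range.mp hj
  have hinit : (List.replicate R (List.replicate C (0:Int))).getD j [] = List.replicate C 0 := by
    rw [List.getD_eq_getElem _ _ (by simpa using hjR)]
    simp
  rw [hinit]
  refine (pvFoldSet (0:Int) (fun _ i => pvCellA a n m j i) C
      (List.replicate C (0:Int)) (by simp)).trans ?_
  rw [List.drop_replicate, Nat.sub_self, List.replicate_zero, List.append_nil]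

theorem pvZipGetD (r s : List Int) (k : Nat) (h2 : k < r.length) (h3 : k < s.length) :
    (List.zipWith max r s).getD k 0 = max (r.getD k 0) (s.getD k 0) := by
  rw [List.getD_eq_getElem _ _ (by simp; omega), List.getD_eq_getElem _ _ h2,
      List.getD_eq_getElem _ _ h3, List.getElem_zipWith]

theorem pvTakeGetD (r : List Int) (m k : Nat) (hk : k < m) (hm : m ≤ r.length) :
    (r.take m).getD k 0 = r.getD k 0 := by
  rw [List.getD_eq_getElem _ _ (by simp; omega), List.getD_eq_getElem _ _ (by omega),
      List.getElem_take]

theorem pvMain (a : List (List Int)) (ha : a ≠ [])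
    (hge : ∀ r ∈ a, (a.headD []).length ≤ r.length) :
    (List.range ((a.length + 1) / 2)).map (fun j =>
      (List.range (((a.headD []).length + 1) / 2)).map
        (fun i => pvCellA a a.length (a.headD []).length j i))
      = (pvRowPairs ((a.headD []).length) a).map pvColPairs := by
  rw [pvRowPairs_eq, List.map_map]
  apply List.map_congr_left
  intro j hj
  have hjR : j < (a.length + 1) / 2 := List.mem_range.mp hj
  have hpos : 0 < a.length := List.length_pos_iff.mpr ha
  have h2j : 2*j < a.length := by omega
  have hmem2j : a.getD (2*j) [] ∈ a := by
    rw [List.getD_eq_getElem _ _ h2j]; exact List.getElem_mem _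
  have hge2j : (a.headD []).length ≤ (a.getD (2*j) []).length := hge _ hmem2j
  have hr : ((a.getD (2*j) []).take (a.headD []).length).length = (a.headD []).length := by
    rw [List.length_take]; omega
  simp only [Function.comp_apply]
  rcases eq_or_ne (2*j+1) a.length with hodd | hne
  · -- lone last row
    rw [if_pos hodd, pvColPairs_eq, hr]
    apply List.map_congr_left
    intro i hi
    have hiC : i < ((a.headD []).length + 1) / 2 := List.mem_range.mp hi
    simp only [pvCellA]
    rcases eq_or_ne (2*i+1) (a.headD []).length with hlast | hmid
    · rw [if_pos ⟨hlast, hodd⟩, if_pos hlast, pvTakeGetD _ _ _ (by omega) hge2j]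
    · have hc1 : ¬(2*i+1 = (a.headD []).length ∧ 2*j+1 = a.length) := fun h => hmid h.1
      rw [if_neg hc1, if_neg hmid, if_neg hmid, if_pos hodd,
          pvTakeGetD _ _ _ (by omega) hge2j, pvTakeGetD _ _ _ (by omega) hge2j]
  · -- paired rows
    have h2j1 : 2*j+1 < a.length := by omega
    have hmem2j1 : a.getD (2*j+1) [] ∈ a := by
      rw [List.getD_eq_getElem _ _ h2j1]; exact List.getElem_mem _
    have hge2j1 : (a.headD []).length ≤ (a.getD (2*j+1) []).length := hge _ hmem2j1
    rw [if_neg hne, pvColPairs_eq]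
    have hzlen : (List.zipWith max ((a.getD (2*j) []).take (a.headD []).length)
        ((a.getD (2*j+1) []).take (a.headD []).length)).length = (a.headD []).length := by
      rw [List.length_zipWith, List.length_take, List.length_take]; omega
    have hz : ∀ k, k < (a.headD []).length →
        (List.zipWith max ((a.getD (2*j) []).take (a.headD []).length)
            ((a.getD (2*j+1) []).take (a.headD []).length)).getD k 0
          = max ((a.getD (2*j) []).getD k 0) ((a.getD (2*j+1) []).getD k 0) := by
      intro k hk
      rw [pvZipGetD _ _ k (by rw [List.length_take]; omega) (by rw [List.length_take]; omega),
          pvTakeGetD _ _ _ hk hge2j, pvTakeGetD _ _ _ hk hge2j1]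
    rw [hzlen]
    apply List.map_congr_left
    intro i hi
    have hiC : i < ((a.headD []).length + 1) / 2 := List.mem_range.mp hi
    simp only [pvCellA]
    have hc2 : ¬(2*i+1 = (a.headD []).length ∧ 2*j+1 = a.length) := fun h => hne h.2
    rcases eq_or_ne (2*i+1) (a.headD []).length with hlast | hmid
    · rw [hz (2*i) (by omega), if_pos hlast, if_neg hc2, if_pos hlast]
    · have h2i1 : 2*i+1 < (a.headD []).length := by omega
      rw [hz (2*i) (by omega), hz _ h2i1, if_neg hc2, if_neg hmid, if_neg hmid, if_neg hne,
          max_assoc, max_max_max_comm]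

theorem minimizeMap_eq (a : List (List Int)) (ha : a ≠ [])
    (hge : ∀ r ∈ a, (a.headD []).length ≤ r.length) :
    minimizeMap a = minimizeMap_alt a := by
  have hpos : 0 < a.length := List.length_pos_iff.mpr ha
  simp only [minimizeMap, minimizeMap_alt]
  split_ifs with h1 h2 h3
  · rw [List.length_replicate,
        pvHeadDReplicate (a.length / 2 + 1) _ _ (by omega), List.length_replicate,
        pvAFill,
        show a.length / 2 + 1 = (a.length + 1) / 2 by omega,
        show (a.headD []).length / 2 + 1 = ((a.headD []).length + 1) / 2 by omega]
    exact pvMain a ha hge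
  · rw [List.length_replicate,
        pvHeadDReplicate (a.length / 2 + 1) _ _ (by omega), List.length_replicate,
        pvAFill,
        show a.length / 2 + 1 = (a.length + 1) / 2 by omega,
        show (a.headD []).length / 2 = ((a.headD []).length + 1) / 2 by omega]
    exact pvMain a ha hge
  · rw [List.length_replicate,
        pvHeadDReplicate (a.length / 2) _ _ (by omega), List.length_replicate,
        pvAFill,
        show a.length / 2 = (a.length + 1) / 2 by omega,
        show (a.headD []).length / 2 + 1 = ((a.headD []).length + 1) / 2 by omega]
    exact pvMain a ha hge
  · rw [List.length_replicate,
        pvHeadDReplicate (a.length / 2) _ _ (by omega), List.length_replicate,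
        pvAFill,
        show a.length / 2 = (a.length + 1) / 2 by omega,
        show (a.headD []).length / 2 = ((a.headD []).length + 1) / 2 by omega]
    exact pvMain a ha hge

-- ===== VERDICT (by name: the statement is the Claim_ definition above) =====
theorem minimizeMap_spec : Claim_equal_minimizeMap := by
  intro a _ hpre
  exact minimizeMap_eq a hpre.1 hpre.2

@[simp] theorem minimizeMap_raises : Claim_raises_minimizeMap := by
  unfold Claim_raises_minimizeMap
  refine ⟨fun a _ h hp => ?_, by decide⟩
  rcases h with h | ⟨r, hr, hlt⟩
  · exact hp.1 h
  · exact absurd (hp.2 r hr) (by omega)
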